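-- pv_equiv track=rewrite | github.com/datagen24/cowrieprocessor | tests/fixtures/statistical_analysis.py | _analyze_file_sizes
-- ===== SOURCE A (Python) =====
-- from typing import Any, Dict, List
--
-- def _analyze_file_sizes(file_sizes: List[int]) -> Dict[str, int]:
--     """Analyze file size distribution."""
--     if not file_sizes:
--         return {}
--
--     distribution = {
--         "tiny": 0,  # < 1KB
--         "small": 0,  # 1KB - 100KB
--         "medium": 0,  # 100KB - 1MB
--         "large": 0,  # 1MB - 10MB
--         "huge": 0,  # > 10MB
--     }
--
--     for size in file_sizes:
--         if size < 1024:
--             distribution["tiny"] += 1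
--         elif size < 102400:
--             distribution["small"] += 1
--         elif size < 1048576:
--             distribution["medium"] += 1
--         elif size < 10485760:
--             distribution["large"] += 1
--         else:
--             distribution["huge"] += 1
--
--     return distribution
-- ===== SOURCE B (Python) =====
-- from typing import Any, Dict, List
--
-- def _analyze_file_sizes(file_sizes: List[int]) -> Dict[str, int]:
--     """Analyze file size distribution via cumulative threshold counts."""
--     if not file_sizes:
--         return {}
--     bounds = [1024, 102400, 1048576, 10485760]
--     # cumulative count of sizes below each ascending bound
--     cuts = [sum(1 for s in file_sizes if s < b) for b in bounds]
--     edges = [0] + cuts + [len(file_sizes)]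
--     labels = ["tiny", "small", "medium", "large", "huge"]
--     return {lab: edges[i + 1] - edges[i] for i, lab in enumerate(labels)}
-- ===== Notes on version B (the rewrite author's own statement) =====
-- stated objective: alternative
-- what changed: Replaced the per-element if/elif classification loop that increments dict counters with staged passes: one cumulative count of sizes below each ascending threshold, after which every bucket is the difference of two adjacent cumulative counts; no per-element bucket selection and no dict mutation.
import Mathlib
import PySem

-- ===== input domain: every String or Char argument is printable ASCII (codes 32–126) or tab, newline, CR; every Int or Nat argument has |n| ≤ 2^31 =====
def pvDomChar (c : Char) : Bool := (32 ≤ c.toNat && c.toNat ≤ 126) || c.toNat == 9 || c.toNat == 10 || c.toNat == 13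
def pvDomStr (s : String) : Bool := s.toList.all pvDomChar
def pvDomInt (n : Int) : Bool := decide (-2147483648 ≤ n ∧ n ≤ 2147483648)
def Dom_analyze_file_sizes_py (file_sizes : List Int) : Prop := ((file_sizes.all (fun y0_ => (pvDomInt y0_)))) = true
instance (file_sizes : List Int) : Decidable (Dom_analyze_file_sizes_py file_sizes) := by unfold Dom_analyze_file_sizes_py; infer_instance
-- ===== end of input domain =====

-- B replaces A's per-element if/elif classification loop (incrementing dict counters)
-- with staged passes: a cumulative count of sizes below each ascending threshold,
-- each bucket being the difference of adjacent cumulative counts; alternative, same cost.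

-- ===== PORT A =====
-- A-side helper: the body of A's 'for size in file_sizes' loop, named for the proofs.
def pvStepA (d : PySem.Dict String Int) (size : Int) : PySem.Dict String Int :=
  if size < 1024 then d.modify "tiny" 0 (· + 1)
  else if size < 102400 then d.modify "small" 0 (· + 1)
  else if size < 1048576 then d.modify "medium" 0 (· + 1)
  else if size < 10485760 then d.modify "large" 0 (· + 1)
  else d.modify "huge" 0 (· + 1)

def analyze_file_sizes_py (file_sizes : List Int) : List (String × Int) :=
  if file_sizes = [] then []
  else
    let init : PySem.Dict String Int :=
      PySem.Dict.ofList [("tiny", 0), ("small", 0), ("medium", 0), ("large", 0), ("huge", 0)]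
    (file_sizes.foldl pvStepA init).items

-- ===== PORT B =====
def analyze_file_sizes_py_alt (file_sizes : List Int) : List (String × Int) :=
  if file_sizes = [] then []
  else
    let bounds : List Int := [1024, 102400, 1048576, 10485760]
    -- sum(1 for s in file_sizes if s < b)
    let cuts : List Int := bounds.map (fun b => ((file_sizes.countP (fun s => s < b)) : Int))
    let edges : List Int := [0] ++ cuts ++ [(file_sizes.length : Int)]
    let labels : List String := ["tiny", "small", "medium", "large", "huge"]
    (PySem.List.enumerate labels).map (fun p =>
      (p.2, PySem.List.pyGetD edges (p.1 + 1) 0 - PySem.List.pyGetD edges p.1 0))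

-- ===== PRECONDITION & SPEC =====
def Spec_analyze_file_sizes_py (file_sizes : List Int) (out : List (String × Int)) : Prop := out = analyze_file_sizes_py_alt file_sizes
instance (file_sizes : List Int) (out : List (String × Int)) : Decidable (Spec_analyze_file_sizes_py file_sizes out) := by unfold Spec_analyze_file_sizes_py; infer_instance

-- ===== CLAIM (what is proved, stated in full; the proofs are below) =====
def Claim_equal_analyze_file_sizes_py : Prop := ∀ (file_sizes : List Int), Dom_analyze_file_sizes_py file_sizes → Spec_analyze_file_sizes_py file_sizes (analyze_file_sizes_py file_sizes)

-- ===== LEMMAS AND PROOFS =====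

-- the five-counter dict A's loop maintains, with symbolic values
def pvD (a b c d e : Int) : PySem.Dict String Int :=
  PySem.Dict.ofList [("tiny", a), ("small", b), ("medium", c), ("large", d), ("huge", e)]

-- A's whole loop, characterised: each counter gains the count of its range
-- pvD is injective-in-arguments congruence
theorem pvD_congr {a₁ a₂ b₁ b₂ c₁ c₂ d₁ d₂ e₁ e₂ : Int}
    (ha : a₁ = a₂) (hb : b₁ = b₂) (hc : c₁ = c₂) (hd : d₁ = d₂) (he : e₁ = e₂) :
    pvD a₁ b₁ c₁ d₁ e₁ = pvD a₂ b₂ c₂ d₂ e₂ := by rw [ha, hb, hc, hd, he]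

theorem pvA_fold (fs : List Int) : ∀ (a b c d e : Int),
    fs.foldl pvStepA (pvD a b c d e) =
      pvD (a + (fs.countP (fun s => s < 1024) : Int))
          (b + (fs.countP (fun s => 1024 ≤ s ∧ s < 102400) : Int))
          (c + (fs.countP (fun s => 102400 ≤ s ∧ s < 1048576) : Int))
          (d + (fs.countP (fun s => 1048576 ≤ s ∧ s < 10485760) : Int))
          (e + (fs.countP (fun s => 10485760 ≤ s) : Int)) := by
  induction fs with
  | nil => intro a b c d e; simp
  | cons x fs ih =>
    intro a b c d e
    simp only [List.foldl_cons, List.countP_cons]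
    by_cases h1 : x < 1024
    · rw [show pvStepA (pvD a b c d e) x = pvD (a + 1) b c d e by
        unfold pvStepA; rw [if_pos h1]; rfl, ih]
      apply pvD_congr <;> · push_cast; split_ifs <;> first | omega | (simp_all; omega) | simp_all
    · by_cases h2 : x < 102400
      · rw [show pvStepA (pvD a b c d e) x = pvD a (b + 1) c d e by
          unfold pvStepA; rw [if_neg h1, if_pos h2]; rfl, ih]
        apply pvD_congr <;> · push_cast; split_ifs <;> first | omega | (simp_all; omega) | simp_all
      · by_cases h3 : x < 1048576
        · rw [show pvStepA (pvD a b c d e) x = pvD a b (c + 1) d e by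
            unfold pvStepA; rw [if_neg h1, if_neg h2, if_pos h3]; rfl, ih]
          apply pvD_congr <;> · push_cast; split_ifs <;> first | omega | (simp_all; omega) | simp_all
        · by_cases h4 : x < 10485760
          · rw [show pvStepA (pvD a b c d e) x = pvD a b c (d + 1) e by
              unfold pvStepA; rw [if_neg h1, if_neg h2, if_neg h3, if_pos h4]; rfl, ih]
            apply pvD_congr <;> · push_cast; split_ifs <;> first | omega | (simp_all; omega) | simp_all
          · rw [show pvStepA (pvD a b c d e) x = pvD a b c d (e + 1) by
              unfold pvStepA; rw [if_neg h1, if_neg h2, if_neg h3, if_neg h4]; rfl, ih]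
            apply pvD_congr <;> · push_cast; split_ifs <;> first | omega | (simp_all; omega) | simp_all

-- a range count is the difference of two cumulative counts
theorem pv_count_split (fs : List Int) (lo hi : Int) (h : lo ≤ hi) :
    (fs.countP (fun s => lo ≤ s ∧ s < hi) : Int) =
      (fs.countP (fun s => s < hi) : Int) - (fs.countP (fun s => s < lo) : Int) := by
  induction fs with
  | nil => simp
  | cons x fs ih =>
    simp only [List.countP_cons]
    split_ifs with p q r <;> push_cast <;> simp_all <;> omega

-- the top count is length minus the last cumulative count
theorem pv_count_top (fs : List Int) (lo : Int) :
    (fs.countP (fun s => lo ≤ s) : Int) =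
      (fs.length : Int) - (fs.countP (fun s => s < lo) : Int) := by
  induction fs with
  | nil => simp
  | cons x fs ih =>
    simp only [List.countP_cons, List.length_cons]
    split_ifs with p <;> push_cast <;> simp_all <;> omega

-- items of the five-counter dict, read off
theorem pvItems (a b c d e : Int) :
    (PySem.Dict.ofList [("tiny", a), ("small", b), ("medium", c), ("large", d), ("huge", e)]).items
      = [("tiny", a), ("small", b), ("medium", c), ("large", d), ("huge", e)] := rfl

-- ===== VERDICT (by name: the statement is the Claim_ definition above) =====
theorem analyze_file_sizes_py_spec : Claim_equal_analyze_file_sizes_py := by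
  intro fs _
  unfold Spec_analyze_file_sizes_py analyze_file_sizes_py analyze_file_sizes_py_alt
  by_cases h : fs = []
  · simp [h]
  · simp only [if_neg h]
    rw [show PySem.Dict.ofList [("tiny", (0:Int)), ("small", 0), ("medium", 0), ("large", 0), ("huge", 0)] = pvD 0 0 0 0 0 from rfl,
      pvA_fold]
    simp only [pvD, List.map_cons, List.map_nil, PySem.List.enumerate]
    rw [pv_count_split fs 1024 102400 (by norm_num),
      pv_count_split fs 102400 1048576 (by norm_num),
      pv_count_split fs 1048576 10485760 (by norm_num),
      pv_count_top fs 10485760]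
    rw [pvItems]
    norm_num [PySem.List.pyGetD]
    exact ⟨rfl, rfl, rfl, rfl⟩
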